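-- pv_equiv track=rewrite | github.com/douaabelfkih/skincare-f | backend/Features.py | contains_irritants
-- ===== SOURCE A (Python) =====
-- def contains_irritants(ingredient_list, irritant_set):
--     """
--     Vérifie si un produit contient des ingrédients irritants
--     Retourne: (bool, list) - (contient_irritants, liste_des_irritants_trouvés)
--     """
--     found_irritants = []
--
--     for ingredient in ingredient_list:
--         # Vérifier si l'ingrédient contient un mot-clé irritant
--         for irritant in irritant_set:
--             if irritant in ingredient.lower():
--                 found_irritants.append(ingredient)
--                 break
--
--     return len(found_irritants) > 0, found_irritants
-- ===== SOURCE B (Python) =====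
-- def contains_irritants(ingredient_list, irritant_set):
--     """
--     Verifie si un produit contient des ingredients irritants
--     Retourne: (bool, list) - (contient_irritants, liste_des_irritants_trouves)
--     """
--     # worklist of not-yet-matched ingredients, lowered once up front
--     pending = [(i, ing.lower()) for i, ing in enumerate(ingredient_list)]
--     hit = []
--     for irritant in irritant_set:
--         still = []
--         for i, low in pending:
--             if irritant in low:
--                 hit.append(i)
--             else:
--                 still.append((i, low))
--         pending = still
--     hit.sort()
--     return bool(hit), [ingredient_list[i] for i in hit]
-- ===== Notes on version B (the rewrite author's own statement) =====
-- stated objective: alternative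
-- what changed: Replaces A's ingredient-major scan (inner irritant loop with append+break) by a worklist algorithm: irritant-major passes over a shrinking list of not-yet-matched (index, lowered-ingredient) pairs, matched indices collected, sorted at the end, and the output rebuilt by indexing.
import Mathlib
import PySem

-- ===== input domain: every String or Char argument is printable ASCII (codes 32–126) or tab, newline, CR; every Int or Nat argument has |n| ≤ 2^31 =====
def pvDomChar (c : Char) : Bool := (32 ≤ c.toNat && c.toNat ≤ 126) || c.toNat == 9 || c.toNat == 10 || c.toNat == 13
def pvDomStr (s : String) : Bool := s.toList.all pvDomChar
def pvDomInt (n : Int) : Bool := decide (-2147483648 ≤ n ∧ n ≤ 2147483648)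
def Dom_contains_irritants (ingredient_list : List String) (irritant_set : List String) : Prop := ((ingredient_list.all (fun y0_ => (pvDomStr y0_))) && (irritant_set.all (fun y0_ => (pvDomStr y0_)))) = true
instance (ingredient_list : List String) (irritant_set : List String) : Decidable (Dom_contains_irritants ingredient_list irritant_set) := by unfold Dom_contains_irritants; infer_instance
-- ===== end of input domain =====

-- B is a worklist algorithm: irritant-major passes shrink a list of unmatched (index, lowered)
-- pairs, matched indices are sorted at the end; objective: alternative (same result, different algorithm).

-- ===== PORT A =====
-- inner 'for irritant in irritant_set: if irritant in ingredient.lower(): … break'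
def pvIrritantLoop (ingredient : String) : List String → Bool
  | [] => false
  | irr :: rest =>
    if PySem.Str.isIn irr (PySem.Str.lower ingredient) then true
    else pvIrritantLoop ingredient rest

def contains_irritants (ingredient_list : List String) (irritant_set : List String) : Bool × List String :=
  let found_irritants := ingredient_list.foldl
    (fun acc ingredient =>
      if pvIrritantLoop ingredient irritant_set then acc ++ [ingredient] else acc) []
  (decide (found_irritants.length > 0), found_irritants)

-- ===== PORT B =====
-- state of the two nested loops: (pending worklist, hit indices); the inner loop partitions
-- the worklist into matched (index appended to hit) and still-pending pairs
def pvPass (irritant : String) (pending : List (Int × String)) (hit : List Int) :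
    List (Int × String) × List Int :=
  pending.foldl
    (fun st q =>
      if PySem.Str.isIn irritant q.2 then (st.1, st.2 ++ [q.1])
      else (st.1 ++ [q], st.2))
    ([], hit)

def contains_irritants_alt (ingredient_list : List String) (irritant_set : List String) : Bool × List String :=
  let pending0 := (PySem.List.enumerate ingredient_list 0).map
    (fun q => (q.1, PySem.Str.lower q.2))
  let st := irritant_set.foldl (fun st irritant => pvPass irritant st.1 st.2) (pending0, [])
  let hit := PySem.List.sorted st.2 (fun x => x) false
  -- ingredient_list[i]: i is an index produced by enumerate, hence a valid non-negative index,
  -- so the total pyGetD is exact here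
  (decide (hit ≠ []), hit.map (fun i => PySem.List.pyGetD ingredient_list i ""))

-- ===== PRECONDITION & SPEC =====
def Spec_contains_irritants (ingredient_list : List String) (irritant_set : List String) (out : Bool × List String) : Prop := out = contains_irritants_alt ingredient_list irritant_set
instance (ingredient_list : List String) (irritant_set : List String) (out : Bool × List String) : Decidable (Spec_contains_irritants ingredient_list irritant_set out) := by unfold Spec_contains_irritants; infer_instance

-- ===== CLAIM (what is proved, stated in full; the proofs are below) =====
def Claim_equal_contains_irritants : Prop := ∀ (ingredient_list : List String) (irritant_set : List String), Dom_contains_irritants ingredient_list irritant_set → Spec_contains_irritants ingredient_list irritant_set (contains_irritants ingredient_list irritant_set)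

-- ===== LEMMAS AND PROOFS =====

-- A's inner break-loop is the 'any' of the membership tests
theorem pvIrritantLoop_eq_any (ing : String) (l : List String) :
    pvIrritantLoop ing l = l.any (fun irr => PySem.Str.isIn irr (PySem.Str.lower ing)) := by
  induction l with
  | nil => rfl
  | cons irr rest ih =>
    simp only [pvIrritantLoop, List.any_cons, ih]
    cases h : PySem.Str.isIn irr (PySem.Str.lower ing) <;> simp_all

-- one pass of the worklist partitions it
theorem pvPass_fold (irritant : String) :
    ∀ (pending : List (Int × String)) (still : List (Int × String)) (hit : List Int),
      pending.foldl
        (fun st q =>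
          if PySem.Str.isIn irritant q.2 then (st.1, st.2 ++ [q.1])
          else (st.1 ++ [q], st.2))
        (still, hit)
      = (still ++ pending.filter (fun q => !PySem.Str.isIn irritant q.2),
         hit ++ (pending.filter (fun q => PySem.Str.isIn irritant q.2)).map (fun q => q.1)) := by
  intro pending
  induction pending with
  | nil => intro still hit; simp
  | cons q rest ih =>
    intro still hit
    cases h : PySem.Str.isIn irritant q.2 <;> simp_all

theorem pvPass_closed (irritant : String) (pending : List (Int × String)) (hit : List Int) :
    pvPass irritant pending hit
      = (pending.filter (fun q => !PySem.Str.isIn irritant q.2),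
         hit ++ (pending.filter (fun q => PySem.Str.isIn irritant q.2)).map (fun q => q.1)) := by
  rw [pvPass, pvPass_fold, List.nil_append]

-- filtering by a disjunction is, up to permutation, filtering by the first disjunct
-- followed by the part matching only the second
theorem pvFilterOrPerm {α : Type} (a b : α → Bool) :
    ∀ (xs : List α),
      (xs.filter (fun x => a x || b x)).Perm
        (xs.filter a ++ xs.filter (fun x => b x && !a x)) := by
  intro xs
  induction xs with
  | nil => simp
  | cons x rest ih =>
    cases ha : a x
    · cases hb : b x
      · simpa [ha, hb] using ih
      · simpa [ha, hb] using (ih.cons x).trans List.perm_middle.symm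
    · simpa [ha] using ih.cons x

-- invariant of the outer fold: pending stays the unmatched filter of the initial worklist,
-- and the hit list is a permutation of the matched indices
theorem pvOuterFold :
    ∀ (rest : List String) (pend : List (Int × String)) (hit : List Int),
      (rest.foldl (fun st irritant => pvPass irritant st.1 st.2) (pend, hit)).1
        = pend.filter (fun q => !rest.any (fun irr => PySem.Str.isIn irr q.2))
      ∧ (rest.foldl (fun st irritant => pvPass irritant st.1 st.2) (pend, hit)).2.Perm
          (hit ++ (pend.filter (fun q => rest.any (fun irr => PySem.Str.isIn irr q.2))).map
            (fun q => q.1)) := by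
  intro rest
  induction rest with
  | nil => intro pend hit; simp
  | cons irr rest ih =>
    intro pend hit
    rw [List.foldl_cons]
    rw [show pvPass irr (pend, hit).1 (pend, hit).2
        = (pend.filter (fun q => !PySem.Str.isIn irr q.2),
           hit ++ (pend.filter (fun q => PySem.Str.isIn irr q.2)).map (fun q => q.1))
      from pvPass_closed irr pend hit]
    obtain ⟨h1, h2⟩ := ih (pend.filter (fun q => !PySem.Str.isIn irr q.2))
      (hit ++ (pend.filter (fun q => PySem.Str.isIn irr q.2)).map (fun q => q.1))
    constructor
    · rw [h1, List.filter_filter]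
      exact List.filter_congr (fun q _ => by
        simp [List.any_cons, Bool.not_or, Bool.and_comm])
    · refine h2.trans ?_
      rw [List.append_assoc]
      refine List.Perm.append_left hit ?_
      rw [List.filter_filter]
      simp only [List.any_cons]
      have hperm := (pvFilterOrPerm (fun q : Int × String => PySem.Str.isIn irr q.2)
        (fun q => rest.any (fun i => PySem.Str.isIn i q.2)) pend).map (fun q : Int × String => q.1)
      rw [List.map_append] at hperm
      exact hperm.symm

-- the matched part of the initial worklist, projected to indices, is strictly increasing
theorem pvEnumFilterPairwise (il : List String) (p : Int × String → Bool) :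
    (((PySem.List.enumerate il 0).filter p).map (fun q => q.1)).Pairwise (· < ·) :=
  ((PySem.List.pairwise_lt_enumerate il 0).sublist List.filter_sublist).map
    (fun q : Int × String => q.1) (fun _ _ h => h)

-- filtering enumerate by a predicate on the element and projecting back gives the plain filter
theorem pvEnumFilterMap (p : String → Bool) :
    ∀ (xs : List String) (s : Int),
      ((PySem.List.enumerate xs s).filter (fun q => p q.2)).map (fun q => q.2) = xs.filter p := by
  intro xs
  induction xs with
  | nil => intro s; simp [PySem.List.enumerate_nil]
  | cons x rest ih =>
    intro s
    cases h : p x <;> simp [PySem.List.enumerate_cons, h, ih]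

-- on members of enumerate, indexing back into the list returns the paired element
theorem pvEnumGetD (il : List String) (q : Int × String) (h : q ∈ PySem.List.enumerate il 0) :
    PySem.List.pyGetD il q.1 "" = q.2 := by
  obtain ⟨k, hk, rfl⟩ := (PySem.List.mem_enumerate_iff il 0 q).mp h
  simp [PySem.List.pyGetD_natCast, List.getD_eq_getElem?_getD, hk]

-- ===== VERDICT (by name: the statement is the Claim_ definition above) =====
theorem contains_irritants_spec : Claim_equal_contains_irritants := by
  intro il isv _
  unfold Spec_contains_irritants contains_irritants contains_irritants_alt
  set p : String → Bool := fun ing => isv.any (fun irr => PySem.Str.isIn irr (PySem.Str.lower ing)) with hp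
  -- A's fold is the filter by p
  have hfold :
      il.foldl (fun acc ingredient =>
        if pvIrritantLoop ingredient isv then acc ++ [ingredient] else acc) [] = il.filter p := by
    rw [PySem.List.foldl_append_if_eq_filter
      (p := fun ing => pvIrritantLoop ing isv) (l := il) (acc := []), List.nil_append]
    exact List.filter_congr (fun x _ => pvIrritantLoop_eq_any x isv)
  -- B's hit list, sorted, is the increasing list of matching indices
  have houter := (pvOuterFold isv
    ((PySem.List.enumerate il 0).map (fun q => (q.1, PySem.Str.lower q.2))) []).2
  rw [List.nil_append] at houter
  have hfuse :
      ((((PySem.List.enumerate il 0).map (fun q => (q.1, PySem.Str.lower q.2))).filter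
          (fun q => isv.any (fun irr => PySem.Str.isIn irr q.2))).map (fun q => q.1))
        = (((PySem.List.enumerate il 0).filter (fun q => p q.2)).map (fun q => q.1)) := by
    rw [List.filter_map, List.map_map]
    rfl
  rw [hfuse] at houter
  have hsorted :
      PySem.List.sorted
        (isv.foldl (fun st irritant => pvPass irritant st.1 st.2)
          ((PySem.List.enumerate il 0).map (fun q => (q.1, PySem.Str.lower q.2)), [])).2
        (fun x => x) false
      = ((PySem.List.enumerate il 0).filter (fun q => p q.2)).map (fun q => q.1) :=
    PySem.List.sorted_eq_of_perm_of_pairwise_lt _ _ _ houter.symm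
      (pvEnumFilterPairwise il (fun q => p q.2))
  simp only [hsorted, hfold]
  -- the rebuilt output is the filter by p
  have hout :
      (((PySem.List.enumerate il 0).filter (fun q => p q.2)).map (fun q => q.1)).map
        (fun i => PySem.List.pyGetD il i "") = il.filter p := by
    rw [List.map_map]
    rw [show ((fun i => PySem.List.pyGetD il i "") ∘ fun q : Int × String => q.1)
        = fun q : Int × String => PySem.List.pyGetD il q.1 "" from rfl]
    rw [List.map_congr_left (fun q hq =>
      pvEnumGetD il q (List.mem_of_mem_filter hq))]
    exact pvEnumFilterMap p il 0
  have hnil :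
      ((((PySem.List.enumerate il 0).filter (fun q => p q.2)).map (fun q => q.1)) = [])
        ↔ il.filter p = [] := by
    constructor
    · intro h; rw [← hout, h]; rfl
    · intro h
      have h2 := hout
      rw [h] at h2
      exact List.map_eq_nil_iff.mp h2
  have hlen : (decide ((il.filter p).length > 0))
      = decide ((((PySem.List.enumerate il 0).filter (fun q => p q.2)).map (fun q => q.1)) ≠ []) :=
    decide_eq_decide.mpr (by rw [gt_iff_lt, List.length_pos_iff]; exact not_congr hnil.symm)
  rw [hout, hlen]
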